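-- pv_equiv track=rewrite | github.com/MahmoudKebbi/programmable-matter | src/ai_agent.py | is_safe_shape_change
-- ===== SOURCE A (Python) =====
-- DIRECTIONS = [(-1, 0), (1, 0), (0, -1), (0, 1), (-1, -1), (-1, 1), (1, -1), (1, 1)]
--
-- def is_safe_shape_change(old_state, new_state):
--     """
--     Ensures that no block gets isolated due to an individual move.
--     - A move is safe if it keeps at least one Moore-connected neighbor.
--     """
--     old_set = set(old_state)
--     new_set = set(new_state)
--
--     for x, y in new_state:
--         neighbors = [(x + dx, y + dy) for dx, dy in DIRECTIONS]
--         if any(neighbor in new_set for neighbor in neighbors):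
--             continue  # Block is still connected
--         else:
--             return False  # Block got isolated
--
--     return True
-- ===== SOURCE B (Python) =====
-- DIRECTIONS = [(-1, 0), (1, 0), (0, -1), (0, 1), (-1, -1), (-1, 1), (1, -1), (1, 1)]
--
-- def is_safe_shape_change(old_state, new_state):
--     # Scatter pass: every Moore neighbor of a present block is "covered".
--     covered = set()
--     for x, y in new_state:
--         for dx, dy in DIRECTIONS:
--             covered.add((x + dx, y + dy))
--     # Verify pass: by symmetry of Moore adjacency, a block has a present
--     # neighbor iff it lies in the neighbor-scatter of the present blocks.
--     return all(b in covered for b in new_state)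
-- ===== Notes on version B (the rewrite author's own statement) =====
-- stated objective: alternative
-- what changed: Replaces the per-block neighbor probe against the state set (with early return) by a two-pass scatter-then-verify: first build the set of all Moore-neighbor coordinates of present blocks, then check every block is in that covered set, relying on symmetry of Moore adjacency.
import Mathlib
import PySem

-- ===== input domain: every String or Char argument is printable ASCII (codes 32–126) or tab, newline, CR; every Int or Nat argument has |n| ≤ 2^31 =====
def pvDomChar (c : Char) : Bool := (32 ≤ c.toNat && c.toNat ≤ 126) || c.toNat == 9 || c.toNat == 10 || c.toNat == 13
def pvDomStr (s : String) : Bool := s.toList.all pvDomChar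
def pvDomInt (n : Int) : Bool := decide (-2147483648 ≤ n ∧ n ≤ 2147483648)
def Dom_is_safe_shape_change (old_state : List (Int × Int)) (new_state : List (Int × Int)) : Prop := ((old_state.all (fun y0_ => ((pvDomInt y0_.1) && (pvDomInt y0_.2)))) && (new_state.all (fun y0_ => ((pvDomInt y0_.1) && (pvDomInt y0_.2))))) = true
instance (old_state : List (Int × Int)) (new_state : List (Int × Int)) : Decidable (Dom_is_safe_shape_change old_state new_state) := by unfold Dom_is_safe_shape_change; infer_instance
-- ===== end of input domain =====

-- B: scatter-then-verify Moore-neighbor coverage instead of A's per-block probe with early return (alternative decomposition, same cost).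
-- ===== PORT A =====
def pvDirs : List (Int × Int) := [(-1, 0), (1, 0), (0, -1), (0, 1), (-1, -1), (-1, 1), (1, -1), (1, 1)]

def pvALoop (new_set : PySem.Set (Int × Int)) : List (Int × Int) → Bool
  | [] => true
  | (x, y) :: rest =>
    let neighbors := pvDirs.map (fun d => (x + d.1, y + d.2))
    if neighbors.any (fun n => PySem.Set.contains new_set n) then
      pvALoop new_set rest
    else
      false

def is_safe_shape_change (old_state : List (Int × Int)) (new_state : List (Int × Int)) : Bool :=
  let _old_set := PySem.Set.ofList old_state
  let new_set := PySem.Set.ofList new_state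
  pvALoop new_set new_state

-- ===== PORT B =====
def is_safe_shape_change_alt (old_state : List (Int × Int)) (new_state : List (Int × Int)) : Bool :=
  let covered := new_state.foldl
    (fun s p => pvDirs.foldl (fun s d => PySem.Set.add s (p.1 + d.1, p.2 + d.2)) s)
    PySem.Set.empty
  new_state.all (fun b => PySem.Set.contains covered b)

-- ===== PRECONDITION & SPEC =====
def Spec_is_safe_shape_change (old_state : List (Int × Int)) (new_state : List (Int × Int)) (out : Bool) : Prop := out = is_safe_shape_change_alt old_state new_state
instance (old_state : List (Int × Int)) (new_state : List (Int × Int)) (out : Bool) : Decidable (Spec_is_safe_shape_change old_state new_state out) := by unfold Spec_is_safe_shape_change; infer_instance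

-- ===== CLAIM (what is proved, stated in full; the proofs are below) =====
def Claim_equal_is_safe_shape_change : Prop := ∀ (old_state : List (Int × Int)) (new_state : List (Int × Int)), Dom_is_safe_shape_change old_state new_state → Spec_is_safe_shape_change old_state new_state (is_safe_shape_change old_state new_state)

-- ===== LEMMAS AND PROOFS =====


theorem pvALoop_eq_all (s : PySem.Set (Int × Int)) (l : List (Int × Int)) :
    pvALoop s l = l.all (fun b => (pvDirs.map (fun d => (b.1 + d.1, b.2 + d.2))).any
      (fun n => PySem.Set.contains s n)) := by
  induction l with
  | nil => rfl
  | cons b rest ih =>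
    obtain ⟨x, y⟩ := b
    simp only [pvALoop, List.all_cons]
    split_ifs with h
    · rw [ih, h, Bool.true_and]
    · rw [Bool.not_eq_true] at h
      rw [h, Bool.false_and]

theorem pvCovered_mem (new_state : List (Int × Int)) (y : Int × Int)
    (s : PySem.Set (Int × Int)) :
    (y ∈ new_state.foldl
      (fun s p => pvDirs.foldl (fun s d => PySem.Set.add s (p.1 + d.1, p.2 + d.2)) s) s) ↔
    y ∈ s ∨ ∃ p ∈ new_state, ∃ d ∈ pvDirs, y = (p.1 + d.1, p.2 + d.2) := by
  induction new_state generalizing s with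
  | nil => simp
  | cons q rest ih =>
    simp only [List.foldl_cons, ih, PySem.Set.mem_foldl_add, List.mem_cons]
    constructor
    · rintro (⟨hy | ⟨d, hd, rfl⟩⟩ | ⟨p, hp, d, hd, rfl⟩)
      · exact Or.inl hy
      · exact Or.inr ⟨q, Or.inl rfl, d, hd, rfl⟩
      · exact Or.inr ⟨p, Or.inr hp, d, hd, rfl⟩
    · rintro (hy | ⟨p, (rfl | hp), d, hd, rfl⟩)
      · exact Or.inl (Or.inl hy)
      · exact Or.inl (Or.inr ⟨d, hd, rfl⟩)
      · exact Or.inr ⟨p, hp, d, hd, rfl⟩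

theorem pvDirs_neg_mem (d : Int × Int) (hd : d ∈ pvDirs) : (-d.1, -d.2) ∈ pvDirs := by
  fin_cases hd <;> decide

-- ===== VERDICT (by name: the statement is the Claim_ definition above) =====
theorem is_safe_shape_change_spec : Claim_equal_is_safe_shape_change := by
  intro old_state new_state _
  unfold Spec_is_safe_shape_change is_safe_shape_change is_safe_shape_change_alt
  rw [Bool.eq_iff_iff, pvALoop_eq_all]
  simp only [List.all_eq_true, List.any_eq_true, List.mem_map, PySem.Set.contains_iff,
    PySem.Set.mem_ofList, pvCovered_mem, PySem.Set.empty, List.not_mem_nil, false_or]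
  constructor
  · intro h b hb
    obtain ⟨n, ⟨d, hd, rfl⟩, hn⟩ := h b hb
    refine ⟨(b.1 + d.1, b.2 + d.2), hn, (-d.1, -d.2), pvDirs_neg_mem d hd, ?_⟩
    cases b; simp
  · intro h b hb
    obtain ⟨p, hp, d, hd, hpd⟩ := h b hb
    refine ⟨(b.1 + -d.1, b.2 + -d.2), ⟨(-d.1, -d.2), pvDirs_neg_mem d hd, rfl⟩, ?_⟩
    have h1 : b.1 = p.1 + d.1 := congrArg Prod.fst hpd
    have h2 : b.2 = p.2 + d.2 := congrArg Prod.snd hpd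
    have hq : (b.1 + -d.1, b.2 + -d.2) = p := by cases p; simp at h1 h2 ⊢; omega
    rw [hq]; exact hp
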